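-- pv_equiv track=rewrite | github.com/ps-nithin/pyrebel_old | sample.py | remove_multi_zero
-- ===== SOURCE A (Python) =====
-- def remove_multi_zero(lst):
--     no_multi_zero=list()
--     no_multi_zero.append(lst[0])
--     for i in range(1,len(lst)):
--         if lst[i]==0 and no_multi_zero[-1]==0:
--             pass
--         else:
--             no_multi_zero.append(lst[i])
--     return no_multi_zero
-- ===== SOURCE B (Python) =====
-- def remove_multi_zero(lst):
--     # Stage 1: split lst into maximal runs of same zero-ness (groupby-style).
--     runs = [[lst[0]]]
--     for x in lst[1:]:
--         if (x == 0) == (runs[-1][0] == 0):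
--             runs[-1].append(x)
--         else:
--             runs.append([x])
--     # Stage 2: flatten, keeping only the first element of each zero run.
--     out = []
--     for run in runs:
--         if run[0] == 0:
--             out.append(run[0])
--         else:
--             out.extend(run)
--     return out
-- ===== Notes on version B (the rewrite author's own statement) =====
-- stated objective: alternative
-- what changed: Replaces A's single accumulator pass (which inspects the last kept element) with a groupby-style two-stage algorithm: first split the list into maximal runs of same zero-ness, then flatten keeping only the first element of each zero run.
-- outside the precondition, e.g. on remove_multi_zero([]): A raises IndexError, B raises IndexError
import Mathlib
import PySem

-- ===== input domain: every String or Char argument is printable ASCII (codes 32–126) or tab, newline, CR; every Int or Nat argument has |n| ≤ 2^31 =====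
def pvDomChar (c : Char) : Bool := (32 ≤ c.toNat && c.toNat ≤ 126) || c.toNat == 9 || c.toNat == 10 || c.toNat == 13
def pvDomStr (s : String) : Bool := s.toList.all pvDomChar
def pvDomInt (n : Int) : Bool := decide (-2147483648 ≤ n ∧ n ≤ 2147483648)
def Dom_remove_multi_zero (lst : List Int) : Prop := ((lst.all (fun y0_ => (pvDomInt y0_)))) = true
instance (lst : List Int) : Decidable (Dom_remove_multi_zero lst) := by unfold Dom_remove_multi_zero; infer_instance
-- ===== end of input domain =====

-- B is a two-stage groupby-style rewrite: it first splits the list into maximal runs of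
-- same zero-ness, then flattens keeping only the first element of each zero run; same
-- cost as A's single accumulator pass, an alternative decomposition. Both raise
-- IndexError on [] (excluded by Pre_).

-- ===== PORT A =====
-- A: start from [lst[0]], loop i in range(1, len(lst)), skip lst[i] when it and the last
-- kept element are both 0, else append.  ([] is excluded by Pre_: lst[0] raises there.)
def remove_multi_zero (lst : List Int) : List Int :=
  match lst with
  | [] => []   -- unreachable under Pre_remove_multi_zero (Python raises IndexError)
  | x :: _ =>
    (PySem.List.pyRange 1 lst.length 1).foldl
      (fun acc i =>
        if PySem.List.pyGetD lst i 0 = 0 ∧ PySem.List.pyGetD acc (-1) 0 = 0 then acc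
        else acc ++ [PySem.List.pyGetD lst i 0])
      [x]

-- ===== PORT B =====
-- B stage 1: runs = [[lst[0]]]; for x in lst[1:]: append x to runs[-1] if same zero-ness
-- as runs[-1][0], else start a new run.  runs[-1] is PySem.List.pyGetD runs (-1) [] (exact:
-- runs is never empty); run[0] is headD 0 (exact: every run is nonempty).
-- B stage 2: out.append(run[0]) for zero runs, out.extend(run) otherwise.
def remove_multi_zero_alt (lst : List Int) : List Int :=
  match lst with
  | [] => []   -- unreachable under Pre_remove_multi_zero (Python raises IndexError)
  | x :: rest =>
    let runs := rest.foldl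
      (fun rs y =>
        if ((y == 0) == ((PySem.List.pyGetD rs (-1) ([] : List Int)).headD 0 == 0)) then
          rs.dropLast ++ [PySem.List.pyGetD rs (-1) ([] : List Int) ++ [y]]
        else rs ++ [[y]])
      [[x]]
    runs.foldl
      (fun out run => if run.headD 0 = 0 then out ++ [run.headD 0] else out ++ run)
      []

-- ===== PRECONDITION & SPEC =====
-- Pre_ excludes only the empty list, on which A (and B) raise IndexError at lst[0].
def Pre_remove_multi_zero (lst : List Int) : Prop := lst ≠ []
instance (lst : List Int) : Decidable (Pre_remove_multi_zero lst) := by unfold Pre_remove_multi_zero; infer_instance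
def pvWitness_remove_multi_zero : List Int := [0, 0, 3, 0]

def Spec_remove_multi_zero (lst : List Int) (out : List Int) : Prop := out = remove_multi_zero_alt lst
instance (lst : List Int) (out : List Int) : Decidable (Spec_remove_multi_zero lst out) := by unfold Spec_remove_multi_zero; infer_instance

-- ===== CLAIM (what is proved, stated in full; the proofs are below) =====
def Claim_equal_remove_multi_zero : Prop := ∀ (lst : List Int), Dom_remove_multi_zero lst → Pre_remove_multi_zero lst → Spec_remove_multi_zero lst (remove_multi_zero lst)

-- ===== LEMMAS AND PROOFS =====

-- A's loop body on the running accumulator.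
def rmzStep (acc : List Int) (e : Int) : List Int :=
  if e = 0 ∧ PySem.List.pyGetD acc (-1) 0 = 0 then acc else acc ++ [e]

-- The common reference: the elements kept after a previous element p.
def rmzPairs (p : Int) : List Int → List Int
  | [] => []
  | e :: t => (if e = 0 ∧ p = 0 then [] else [e]) ++ rmzPairs e t

-- B's stage-1 step and stage-2 per-run contribution.
def rmzStepB (rs : List (List Int)) (y : Int) : List (List Int) :=
  if ((y == 0) == ((PySem.List.pyGetD rs (-1) ([] : List Int)).headD 0 == 0)) then
    rs.dropLast ++ [PySem.List.pyGetD rs (-1) ([] : List Int) ++ [y]]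
  else rs ++ [[y]]

def rmzContrib (run : List Int) : List Int :=
  if run.headD 0 = 0 then [run.headD 0] else run

-- A-side invariant: as long as the last kept element is 0 exactly when the previous
-- input element was 0, A's fold appends exactly the rmzPairs selection.
lemma rmz_foldl_eq (rest : List Int) : ∀ (acc : List Int) (p : Int),
    acc ≠ [] → (PySem.List.pyGetD acc (-1) 0 = 0 ↔ p = 0) →
    rest.foldl rmzStep acc = acc ++ rmzPairs p rest := by
  induction rest with
  | nil => intro acc p _ _; simp [rmzPairs]
  | cons e t ih =>
    intro acc p hne hlast
    simp only [List.foldl_cons, rmzPairs]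
    by_cases he : e = 0 ∧ p = 0
    · have : rmzStep acc e = acc := by
        simp [rmzStep, he.1, hlast.mpr he.2]
      rw [this, ih acc e hne (by rw [hlast]; simp [he.1, he.2]), he.1, he.2]
      simp
    · have hstep : rmzStep acc e = acc ++ [e] := by
        unfold rmzStep
        rcases Decidable.em (e = 0) with h0 | h0
        · have hp : p ≠ 0 := fun hp => he ⟨h0, hp⟩
          rw [if_neg]; intro ⟨_, hl⟩; exact hp (hlast.mp hl)
        · rw [if_neg]; intro ⟨hl, _⟩; exact h0 hl
      rw [hstep, ih (acc ++ [e]) e (by simp)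
            (by rw [PySem.List.pyGetD_neg_one_append_singleton])]
      simp [he]

-- B-side invariant: the flattened contribution of the runs built so far, with the head
-- of the (nonempty) last run having the zero-ness of the previous input element.
lemma rmzB_inv (es : List Int) : ∀ (init : List (List Int)) (r : List Int) (p : Int),
    r ≠ [] → (r.headD 0 = 0 ↔ p = 0) →
    (es.foldl rmzStepB (init ++ [r])).flatMap rmzContrib
      = (init ++ [r]).flatMap rmzContrib ++ rmzPairs p es := by
  induction es with
  | nil => intro init r p _ _; simp [rmzPairs]
  | cons e t ih =>
    intro init r p hr hhead
    obtain ⟨a, r', rfl⟩ : ∃ a r', r = a :: r' := by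
      cases r with
      | nil => exact absurd rfl hr
      | cons a r' => exact ⟨a, r', rfl⟩
    have hha : (a :: r').headD 0 = a := rfl
    simp only [List.foldl_cons, rmzPairs]
    have hlast : PySem.List.pyGetD (init ++ [a :: r']) (-1) ([] : List Int) = a :: r' :=
      PySem.List.pyGetD_neg_one_append_singleton _ _ _
    by_cases ha : a = 0
    · -- zero run at the end; p = 0
      have hp : p = 0 := hhead.mp (by simp [ha])
      by_cases he : e = 0
      · -- extend the zero run; flatten unchanged
        have hstep : rmzStepB (init ++ [a :: r']) e
            = init ++ [(a :: r') ++ [e]] := by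
          simp [rmzStepB, hlast, ha, he]
        rw [hstep, ih init ((a :: r') ++ [e]) e (by simp) (by simp [ha, he])]
        simp [rmzContrib, ha, he, hp]
      · -- new nonzero run
        have hstep : rmzStepB (init ++ [a :: r']) e
            = (init ++ [a :: r']) ++ [[e]] := by
          simp [rmzStepB, hlast, ha, he]
        rw [hstep, ih (init ++ [a :: r']) [e] e (by simp) (by simp)]
        simp [rmzContrib, he, hp]
    · -- nonzero run at the end; p ≠ 0
      have hp : p ≠ 0 := fun h => ha (by simpa [hha] using hhead.mpr h)
      by_cases he : e = 0
      · -- new zero run; contributes [e]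
        have hstep : rmzStepB (init ++ [a :: r']) e
            = (init ++ [a :: r']) ++ [[e]] := by
          simp [rmzStepB, hlast, ha, he]
        rw [hstep, ih (init ++ [a :: r']) [e] e (by simp) (by simp [he])]
        simp [rmzContrib, he, hp]
      · -- extend the nonzero run; contributes [e] at the end
        have hstep : rmzStepB (init ++ [a :: r']) e
            = init ++ [(a :: r') ++ [e]] := by
          simp [rmzStepB, hlast, ha, he]
        rw [hstep, ih init ((a :: r') ++ [e]) e (by simp) (by simp [ha, he])]
        simp [rmzContrib, ha, he, hp]

-- ===== VERDICT (by name: the statement is the Claim_ definition above) =====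
theorem remove_multi_zero_spec : Claim_equal_remove_multi_zero := by
  intro lst _ hpre
  unfold Spec_remove_multi_zero
  match lst with
  | [] => exact absurd rfl hpre
  | x :: rest =>
    unfold remove_multi_zero remove_multi_zero_alt
    dsimp only
    -- A side: fold over pyRange = fold over rest, then the invariant.
    have hfold :
        (PySem.List.pyRange 1 ((x :: rest).length : Int) 1).foldl
          (fun acc i =>
            if PySem.List.pyGetD (x :: rest) i 0 = 0 ∧ PySem.List.pyGetD acc (-1) 0 = 0 then acc
            else acc ++ [PySem.List.pyGetD (x :: rest) i 0]) [x]
          = rest.foldl rmzStep [x] := by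
      have := PySem.List.foldl_pyRange_pyGetD (xs := x :: rest) (a := 1) (d := 0)
        (f := rmzStep) (init := [x]) (by norm_num)
      simpa [rmzStep] using this
    rw [hfold, rmz_foldl_eq rest [x] x (List.cons_ne_nil x [])
        (by rw [PySem.List.pyGetD_neg_one (h := List.cons_ne_nil x [])]; simp)]
    -- B side: stage 2 is a flatMap of the runs, then the runs invariant.
    symm
    have hfun : ∀ (out run : List Int),
        (if run.headD 0 = 0 then out ++ [run.headD 0] else out ++ run)
          = out ++ rmzContrib run := by
      intro out run; unfold rmzContrib; split <;> rfl
    simp only [hfun]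
    rw [PySem.List.foldl_append_eq_flatMap]
    rw [show (rest.foldl
        (fun rs y =>
          if ((y == 0) == ((PySem.List.pyGetD rs (-1) ([] : List Int)).headD 0 == 0)) then
            rs.dropLast ++ [PySem.List.pyGetD rs (-1) ([] : List Int) ++ [y]]
          else rs ++ [[y]]) [[x]])
        = rest.foldl rmzStepB ([] ++ [[x]]) from rfl]
    rw [rmzB_inv rest [] [x] x (by simp) (by simp)]
    by_cases hx : x = 0 <;> simp [rmzContrib, hx]
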